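-- pv_equiv track=rewrite | github.com/dideher/dide-scripts | Payroll tools/CreateZipsForAFMs/main.py | verify_afm
-- ===== SOURCE A (Python) =====
-- def verify_afm(value):
--     afm = value
--
--     if len(afm) != 9:
--         return False
--
--     if not afm.isdigit():
--         return False
--
--     chcknumbers = [0, 2, 4, 8, 16, 32, 64, 128, 256]
--     lchcknumbers = len(chcknumbers) - 1
--     sum = 0
--
--     for i in range(9):
--         sum += (int(afm[i]) * chcknumbers[lchcknumbers - i])
--
--     ch_digit = int(afm[8])
--
--     ypoloipo = sum % 11
--
--     if ypoloipo == 10: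
--         ypoloipo = 0
--
--     if ypoloipo == ch_digit:
--         return True
--     else:
--         return False
-- ===== SOURCE B (Python) =====
-- def verify_afm(value):
--     afm = value
--     if len(afm) != 9:
--         return False
--     if not afm.isdigit():
--         return False
--     # Horner doubling over the first 8 digits; weights in A are 2^(8-i), i.e. 2 * Horner.
--     total = 0
--     for i in range(8):
--         total = total * 2 + int(afm[i])
--     ypoloipo = (2 * total) % 11
--     if ypoloipo == 10:
--         ypoloipo = 0
--     return ypoloipo == int(afm[8])
-- ===== Notes on version B (the rewrite author's own statement) =====
-- stated objective: alternative
-- what changed: Replaces A's precomputed power-of-two weight table and index arithmetic (chcknumbers[8-i]) with a single Horner-doubling accumulator over the first 8 digits, doubling once more before the mod-11 remap.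
import Mathlib
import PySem

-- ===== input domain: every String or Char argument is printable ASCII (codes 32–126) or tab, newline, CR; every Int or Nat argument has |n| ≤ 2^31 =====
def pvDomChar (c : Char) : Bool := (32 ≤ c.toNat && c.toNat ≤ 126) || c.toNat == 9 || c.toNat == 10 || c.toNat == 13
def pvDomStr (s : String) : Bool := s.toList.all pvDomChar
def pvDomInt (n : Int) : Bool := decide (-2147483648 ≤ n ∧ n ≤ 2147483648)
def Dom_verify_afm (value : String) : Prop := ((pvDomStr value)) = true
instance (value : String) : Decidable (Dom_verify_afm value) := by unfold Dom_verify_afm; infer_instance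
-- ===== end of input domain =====

-- B replaces A's weight table by a single Horner-doubling pass over the first 8 digits (alternative decomposition, same cost).

-- ===== PORT A =====
-- int(afm[i]) on a single character: PySem.Int.ofChars?; after the isdigit guard (on the ASCII
-- domain) it is always `some`, so `.getD 0` never substitutes its default.
def verify_afm (value : String) : Bool :=
  let afm := value.toList
  if PySem.Chars.len afm ≠ 9 then false
  else if ¬ PySem.Chars.strIsdigit afm then false
  else
    let chcknumbers : List Int := [0, 2, 4, 8, 16, 32, 64, 128, 256]
    let lchcknumbers : Int := PySem.List.len chcknumbers - 1
    let sum := (PySem.List.pyRange 0 9 1).foldl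
      (fun s i => s + ((PySem.Int.ofChars? [PySem.List.pyGetD afm i ' ']).getD 0)
          * PySem.List.pyGetD chcknumbers (lchcknumbers - i) 0) 0
    let ch_digit := (PySem.Int.ofChars? [PySem.List.pyGetD afm 8 ' ']).getD 0
    let ypoloipo := PySem.Int.mod sum 11
    let ypoloipo := if ypoloipo = 10 then 0 else ypoloipo
    if ypoloipo = ch_digit then true else false

-- ===== PORT B =====
def verify_afm_alt (value : String) : Bool :=
  let afm := value.toList
  if PySem.Chars.len afm ≠ 9 then false
  else if ¬ PySem.Chars.strIsdigit afm then false
  else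
    let total := (PySem.List.pyRange 0 8 1).foldl
      (fun t i => t * 2 + (PySem.Int.ofChars? [PySem.List.pyGetD afm i ' ']).getD 0) 0
    let ypoloipo := PySem.Int.mod (2 * total) 11
    let ypoloipo := if ypoloipo = 10 then 0 else ypoloipo
    ypoloipo = (PySem.Int.ofChars? [PySem.List.pyGetD afm 8 ' ']).getD 0

-- ===== PRECONDITION & SPEC =====
def Spec_verify_afm (value : String) (out : Bool) : Prop := out = verify_afm_alt value
instance (value : String) (out : Bool) : Decidable (Spec_verify_afm value out) := by unfold Spec_verify_afm; infer_instance

-- ===== CLAIM (what is proved, stated in full; the proofs are below) =====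
def Claim_equal_verify_afm : Prop := ∀ (value : String), Dom_verify_afm value → Spec_verify_afm value (verify_afm value)

-- ===== LEMMAS AND PROOFS =====

-- int() of a single ASCII digit character.
theorem ofChars_digit (c : Char) (h1 : '0' ≤ c) (h2 : c ≤ '9') :
    PySem.Int.ofChars? [c] = some ((c.toNat : Int) - 48) := by
  have h : c.toNat = 48 ∨ c.toNat = 49 ∨ c.toNat = 50 ∨ c.toNat = 51 ∨ c.toNat = 52 ∨
      c.toNat = 53 ∨ c.toNat = 54 ∨ c.toNat = 55 ∨ c.toNat = 56 ∨ c.toNat = 57 := by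
    simp [Char.le_def, UInt32.le_iff_toNat_le] at h1 h2
    have e1 : ('0').val.toNat = 48 := by decide
    have e2 : ('9').val.toNat = 57 := by decide
    have hv : c.toNat = c.val.toNat := rfl
    rw [hv]
    omega
  have hc : c = Char.ofNat c.toNat := (Char.ofNat_toNat c).symm
  rcases h with h|h|h|h|h|h|h|h|h|h <;> rw [h] at hc <;> subst hc <;> decide

-- ===== VERDICT (by name: the statement is the Claim_ definition above) =====
theorem verify_afm_spec : Claim_equal_verify_afm := by
  intro value _
  unfold Spec_verify_afm verify_afm verify_afm_alt
  generalize value.toList = cs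
  by_cases hl : PySem.Chars.len cs = 9
  · simp only [hl, ne_eq, not_true_eq_false, if_false]
    -- length 9 forces nine characters
    have h9 : cs.length = 9 := by
      have := hl; simp only [PySem.Chars.len] at this; exact_mod_cast this
    obtain ⟨c0, c1, c2, c3, c4, c5, c6, c7, c8, hrest⟩ :
        ∃ c0 c1 c2 c3 c4 c5 c6 c7 c8, cs = [c0,c1,c2,c3,c4,c5,c6,c7,c8] := by
      match cs, h9 with
      | [a,b,c,d,e,f,g,h,i], _ => exact ⟨a,b,c,d,e,f,g,h,i, rfl⟩
    subst hrest
    by_cases hd : PySem.Chars.strIsdigit [c0,c1,c2,c3,c4,c5,c6,c7,c8] = true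
    · have hd' := hd
      simp only [PySem.Chars.strIsdigit, List.all_cons, List.all_nil, Bool.and_true,
        List.isEmpty, Bool.not_false, Bool.true_and, Bool.and_eq_true,
        PySem.Chars.isdigit, decide_eq_true_eq] at hd'
      obtain ⟨⟨h00,h01⟩,⟨h10,h11⟩,⟨h20,h21⟩,⟨h30,h31⟩,⟨h40,h41⟩,⟨h50,h51⟩,⟨h60,h61⟩,⟨h70,h71⟩,⟨h80,h81⟩⟩ := hd'
      simp only [hd, not_true_eq_false, if_neg, not_false_eq_true]
      -- evaluate both folds over the literal ranges and indices
      have hr9 : PySem.List.pyRange 0 9 1 = [0,1,2,3,4,5,6,7,8] := by decide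
      have hr8 : PySem.List.pyRange 0 8 1 = [0,1,2,3,4,5,6,7] := by decide
      rw [hr9, hr8]
      simp only [List.foldl_cons, List.foldl_nil]
      norm_num [pysem]
      simp only [show Int.toNat 2 = 2 from rfl, show Int.toNat 3 = 3 from rfl,
        show Int.toNat 4 = 4 from rfl, show Int.toNat 5 = 5 from rfl,
        show Int.toNat 6 = 6 from rfl, show Int.toNat 7 = 7 from rfl,
        show Int.toNat 8 = 8 from rfl, List.getElem_cons_succ, List.getElem_cons_zero]
      rw [ofChars_digit c0 h00 h01, ofChars_digit c1 h10 h11, ofChars_digit c2 h20 h21,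
        ofChars_digit c3 h30 h31, ofChars_digit c4 h40 h41, ofChars_digit c5 h50 h51,
        ofChars_digit c6 h60 h61, ofChars_digit c7 h70 h71, ofChars_digit c8 h80 h81]
      simp only [Option.getD_some]
      ring_nf

    · simp [hd]
  · have hne : (cs.length : Int) ≠ 9 := by simpa [PySem.Chars.len] using hl
    simp [hne]
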